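-- pv_equiv track=rewrite | github.com/itqop/dga_predict | test1.py | clean4
-- ===== SOURCE A (Python) =====
-- def clean4(text):
--     text = text.lower()
--     t = ""
--     if (len(text) > 4):
--         text = text[0:text.index(".")]
--         for i in range(len(text) - 3):
--             t += text[i:i + 4] + " "
--         t += "\n"
--     return t
-- ===== SOURCE B (Python) =====
-- def clean4(text):
--     text = text.lower()
--     if len(text) <= 4:
--         return ""
--     return _grams(text[:text.index(".")])
--
-- def _grams(s):
--     # recursive sliding window: emit the first 4-gram, recurse on the tail
--     if len(s) < 4:
--         return "\n"
--     return s[:4] + " " + _grams(s[1:])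
-- ===== Notes on version B (the rewrite author's own statement) =====
-- stated objective: alternative
-- what changed: Replaces the range-indexed loop with string-accumulator by a recursive decomposition: a helper emits the current first 4-gram and recurses on the one-shifted suffix, bottoming out with the newline; the trailing-newline append and the main loop disappear.
import Mathlib
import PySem

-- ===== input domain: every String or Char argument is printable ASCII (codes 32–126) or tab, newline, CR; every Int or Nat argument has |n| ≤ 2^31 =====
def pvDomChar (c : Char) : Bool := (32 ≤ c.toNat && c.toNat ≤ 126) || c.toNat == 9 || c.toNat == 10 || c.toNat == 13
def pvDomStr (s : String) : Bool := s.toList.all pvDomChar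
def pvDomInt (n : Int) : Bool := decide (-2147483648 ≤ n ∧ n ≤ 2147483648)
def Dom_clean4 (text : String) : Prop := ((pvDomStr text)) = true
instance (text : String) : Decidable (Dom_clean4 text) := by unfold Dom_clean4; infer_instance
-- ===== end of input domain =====

-- B replaces A's indexed loop + accumulator by a recursive helper: emit the first 4-gram, recurse on the shifted suffix, base case "\n" (alternative decomposition, same cost).

-- ===== PORT A =====
def clean4 (text : String) : String :=
  let text := PySem.Str.lower text
  let t : String := ""
  if PySem.Str.len text > 4 then
    -- text = text[0:text.index(".")]  (Python raises ValueError when no dot is present; Pre_ excludes that)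
    let text2 := PySem.Str.slice text (some 0) (some (PySem.Str.find text "."))
    let t := (PySem.List.pyRange 0 ((PySem.Str.len text2 : Int) - 3) 1).foldl
      (fun t i => t ++ PySem.Str.slice text2 (some i) (some (i + 4)) ++ " ") t
    t ++ "\n"
  else t

-- ===== PORT B =====
-- _grams: if len(s) < 4: return "\n"; return s[:4] + " " + _grams(s[1:])
def gramsB (s : List Char) : List Char :=
  if s.length < 4 then ['\n']
  else s.take 4 ++ [' '] ++ gramsB s.tail
termination_by s.length
decreasing_by
  rename_i h
  cases s with
  | nil => simp at h
  | cons a r => simp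

def clean4_alt (text : String) : String :=
  let text := PySem.Str.lower text
  if PySem.Str.len text ≤ 4 then ""
  else
    String.ofList (gramsB (PySem.Str.slice text none (some (PySem.Str.find text "."))).toList)

-- ===== PRECONDITION & SPEC =====
-- Pre_ excludes exactly the inputs where Python A raises ValueError: len(text) > 4 but no dot in text.
def Pre_clean4 (text : String) : Prop := PySem.Str.len text ≤ 4 ∨ PySem.Str.isIn "." text = true
instance (text : String) : Decidable (Pre_clean4 text) := by unfold Pre_clean4; infer_instance
def pvWitness_clean4 : String := "google.com"
def Spec_clean4 (text : String) (out : String) : Prop := out = clean4_alt text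
instance (text : String) (out : String) : Decidable (Spec_clean4 text out) := by unfold Spec_clean4; infer_instance

-- ===== CLAIM (what is proved, stated in full; the proofs are below) =====
def Claim_equal_clean4 : Prop := ∀ (text : String), Dom_clean4 text → Pre_clean4 text → Spec_clean4 text (clean4 text)

-- ===== LEMMAS AND PROOFS =====

-- B's recursion produces exactly the windows (p.drop i).take 4 (each with a trailing space), then '\n'
lemma gramsB_eq (p : List Char) :
    gramsB p = ((List.range (p.length - 3)).map (fun i => (p.drop i).take 4 ++ [' '])).flatten ++ ['\n'] := by
  induction p with
  | nil => simp [gramsB]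
  | cons a xs ih =>
    match xs, ih with
    | [], _ => simp [gramsB]
    | [b], _ => simp [gramsB]
    | [b, c], _ => simp [gramsB]
    | b :: c :: d :: r, ih =>
      rw [gramsB]
      have hlen : ¬ (a :: b :: c :: d :: r).length < 4 := by simp
      rw [if_neg hlen]
      have h : (a :: b :: c :: d :: r).length - 3 = ((b :: c :: d :: r).length - 3) + 1 := by simp
      rw [h, List.range_succ_eq_map]
      simp only [List.tail_cons, List.map_cons, List.map_map, List.flatten_cons]
      rw [ih]
      simp [Function.comp_def]

-- A's foldl over range with slicing flattens to the same windows, each followed by a space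
lemma fold_slices_eq (p : List Char) (n : Nat) (acc : List Char) :
    (List.range n).foldl
        (fun t (k : Nat) => t ++ PySem.List.slice p (some (k : Int)) (some ((k : Int) + 4)) ++ [' ']) acc
    = acc ++ ((List.range n).map (fun i => (p.drop i).take 4 ++ [' '])).flatten := by
  induction n generalizing acc with
  | zero => simp
  | succ m ih =>
    rw [List.range_succ, List.foldl_append, List.map_append, List.flatten_append, ih]
    have h4 : ((m : Int) + 4) = ((m : Int) + ((4 : Nat) : Int)) := by norm_num
    simp only [List.foldl_cons, List.foldl_nil, List.map_cons, List.map_nil,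
      List.flatten_cons, List.flatten_nil]
    rw [h4, PySem.List.slice_natCast_add]
    simp [List.append_assoc]

-- push toList through A's string-building fold
lemma toList_fold (s2 : String) (l : List Int) (acc : String) :
    (l.foldl (fun (t : String) i => t ++ PySem.Str.slice s2 (some i) (some (i + 4)) ++ " ") acc).toList
    = l.foldl (fun t i => t ++ PySem.List.slice s2.toList (some i) (some (i + 4)) ++ [' ']) acc.toList := by
  induction l generalizing acc with
  | nil => rfl
  | cons x xs ih => simp [ih]

theorem clean4_equal (text : String) : clean4 text = clean4_alt text := by
  unfold clean4 clean4_alt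
  dsimp only
  by_cases h : PySem.Str.len (PySem.Str.lower text) > 4
  · rw [if_pos h, if_neg (by omega : ¬ PySem.Str.len (PySem.Str.lower text) ≤ 4)]
    set lt := PySem.Str.lower text with hlt
    have hsl : PySem.Str.slice lt (some 0) (some (PySem.Str.find lt "."))
        = PySem.Str.slice lt none (some (PySem.Str.find lt ".")) := by
      apply String.toList_inj.mp
      simp
    rw [hsl]
    set s2 := PySem.Str.slice lt none (some (PySem.Str.find lt ".")) with hs2
    set p := s2.toList with hp
    apply String.toList_inj.mp
    simp only [String.toList_append]
    rw [toList_fold]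
    have hlen : PySem.Str.len s2 = p.length := by rw [hp]; simp only [PySem.Str.len_eq]
    rw [hlen, PySem.List.pyRange_one]
    have hr : (((p.length : Int) - 3 - 0).toNat) = p.length - 3 := by omega
    rw [hr, List.foldl_map]
    simp only [zero_add]
    rw [fold_slices_eq]
    rw [String.toList_ofList, gramsB_eq, ← hp]
    simp
  · rw [if_neg h, if_pos (by omega : PySem.Str.len (PySem.Str.lower text) ≤ 4)]

-- ===== VERDICT (by name: the statement is the Claim_ definition above) =====
theorem clean4_spec : Claim_equal_clean4 := by
  intro text _ _
  exact clean4_equal text
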